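-- pv_equiv track=rewrite | github.com/aibc-hp/kNN | Machine_Learning/Naive_Bayes/Naive_Bayes_nbc.py | data_vector
-- ===== SOURCE A (Python) =====
-- def data_vector(feature_words: list, train_data_list: list, test_data_list: list) -> (list, list):
--     """
--     :param feature_words: 数据集的特征词汇表
--     :param train_data_list: 训练数据，二维列表，每个元素表示一个新闻样本
--     :param test_data_list: 测试数据，二维列表，每个元素表示一个新闻样本
--     :return: 向量化的训练数据和测试数据
--     """
--     train_feature_list = []  # train_data_list 的向量化形式
--     test_feature_list = []  # test_data_list 的向量化形式
--
--     # 将训练数据向量化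
--     for sample in train_data_list:
--         train_sample_list = []  # 用于存储训练集单个样本的特征词汇，元素个数与 feature_words 一致
--         sample_set = set(sample)  # 将样本数据进行去重
--         for word in feature_words:
--             if word in sample_set:
--                 train_sample_list.append(1)
--             else:
--                 train_sample_list.append(0)
--         train_feature_list.append(train_sample_list)
--
--     # 将测试数据向量化
--     for sample in test_data_list:
--         test_sample_list = []  # 用于存储测试集单个样本的特征词汇，元素个数与 feature_words 一致
--         sample_set = set(sample)  # 将样本数据进行去重
--         for word in feature_words:
--             if word in sample_set:
--                 test_sample_list.append(1)
--             else:
--                 test_sample_list.append(0)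
--         test_feature_list.append(test_sample_list)
--
--     return train_feature_list, test_feature_list
-- ===== SOURCE B (Python) =====
-- def data_vector(feature_words: list, train_data_list: list, test_data_list: list) -> (list, list):
--     # Build a word -> list-of-positions index once, then mark hit positions per sample.
--     index = {}
--     for i, word in enumerate(feature_words):
--         index.setdefault(word, []).append(i)
--     n = len(feature_words)
--
--     def vectorize(sample):
--         hit = set()
--         for word in set(sample):
--             hit.update(index.get(word, []))
--         return [1 if i in hit else 0 for i in range(n)]
--
--     return [vectorize(s) for s in train_data_list], [vectorize(s) for s in test_data_list]
-- ===== Notes on version B (the rewrite author's own statement) =====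
-- stated objective: alternative
-- what changed: Builds a word-to-positions index over feature_words once and, per sample, marks the hit positions found through that index, instead of A's per-sample scan that tests every feature word against the sample's set (and instead of A's duplicated train/test loops).
import Mathlib
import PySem

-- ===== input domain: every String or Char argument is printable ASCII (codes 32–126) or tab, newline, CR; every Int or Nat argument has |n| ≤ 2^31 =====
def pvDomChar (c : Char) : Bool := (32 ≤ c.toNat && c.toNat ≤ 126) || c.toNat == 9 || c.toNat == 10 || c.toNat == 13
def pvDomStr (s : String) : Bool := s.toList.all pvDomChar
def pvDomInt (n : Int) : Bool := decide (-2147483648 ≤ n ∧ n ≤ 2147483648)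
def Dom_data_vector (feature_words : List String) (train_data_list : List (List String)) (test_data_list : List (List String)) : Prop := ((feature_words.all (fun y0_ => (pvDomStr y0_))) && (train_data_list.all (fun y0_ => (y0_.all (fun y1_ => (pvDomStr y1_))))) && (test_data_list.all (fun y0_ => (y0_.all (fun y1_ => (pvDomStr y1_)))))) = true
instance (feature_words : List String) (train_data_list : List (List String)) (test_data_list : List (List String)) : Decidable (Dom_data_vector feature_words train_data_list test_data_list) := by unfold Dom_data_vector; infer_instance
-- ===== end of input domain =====

-- B replaces A's per-sample scan over all feature words (with duplicated train/test loops)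
-- by a word-to-positions index built once plus per-sample hit marking: alternative data structure, same results.


-- ===== PORT A =====
def data_vector (feature_words : List String) (train_data_list : List (List String)) (test_data_list : List (List String)) : List (List Int) × List (List Int) :=
  -- for sample in train_data_list: inner loop over feature_words appending 1/0
  let train_feature_list : List (List Int) :=
    train_data_list.foldl (fun acc sample =>
      let sample_set : PySem.Set String := PySem.Set.ofList sample
      acc ++ [feature_words.foldl (fun sl word =>
        if PySem.Set.contains sample_set word then sl ++ [(1 : Int)] else sl ++ [(0 : Int)]) []]) []
  -- for sample in test_data_list: the same loop, duplicated as in A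
  let test_feature_list : List (List Int) :=
    test_data_list.foldl (fun acc sample =>
      let sample_set : PySem.Set String := PySem.Set.ofList sample
      acc ++ [feature_words.foldl (fun sl word =>
        if PySem.Set.contains sample_set word then sl ++ [(1 : Int)] else sl ++ [(0 : Int)]) []]) []
  (train_feature_list, test_feature_list)

-- ===== PORT B =====
-- index: for i, word in enumerate(feature_words): index.setdefault(word, []).append(i)
def dvIndex (feature_words : List String) : PySem.Dict String (List Int) :=
  (PySem.List.enumerate feature_words 0).foldl
    (fun d p => d.modify p.2 [] (fun l => l ++ [p.1])) PySem.Dict.empty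

-- vectorize(sample): hit = set(); for word in set(sample): hit.update(index.get(word, []));
--                    return [1 if i in hit else 0 for i in range(n)]
def dvVectorize (index : PySem.Dict String (List Int)) (n : Int) (sample : List String) : List Int :=
  let hit : PySem.Set Int :=
    (PySem.Set.ofList sample).foldl (fun h word => PySem.Set.update h (index.getD word [])) PySem.Set.empty
  (PySem.List.pyRange 0 n 1).map (fun i => if PySem.Set.contains hit i then (1 : Int) else 0)

def data_vector_alt (feature_words : List String) (train_data_list : List (List String)) (test_data_list : List (List String)) : List (List Int) × List (List Int) :=
  let index := dvIndex feature_words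
  let n := PySem.List.len feature_words
  (train_data_list.map (dvVectorize index n), test_data_list.map (dvVectorize index n))

-- ===== PRECONDITION & SPEC =====
def Spec_data_vector (feature_words : List String) (train_data_list : List (List String)) (test_data_list : List (List String)) (out : List (List Int) × List (List Int)) : Prop := out = data_vector_alt feature_words train_data_list test_data_list
instance (feature_words : List String) (train_data_list : List (List String)) (test_data_list : List (List String)) (out : List (List Int) × List (List Int)) : Decidable (Spec_data_vector feature_words train_data_list test_data_list out) := by unfold Spec_data_vector; infer_instance

-- ===== CLAIM (what is proved, stated in full; the proofs are below) =====
def Claim_equal_data_vector : Prop := ∀ (feature_words : List String) (train_data_list : List (List String)) (test_data_list : List (List String)), Dom_data_vector feature_words train_data_list test_data_list → Spec_data_vector feature_words train_data_list test_data_list (data_vector feature_words train_data_list test_data_list)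

-- ===== LEMMAS AND PROOFS =====

-- the index maps a word to exactly the enumerate positions that carry it
lemma dvIndex_getD (fw : List String) (w : String) :
    (dvIndex fw).getD w [] = ((PySem.List.enumerate fw 0).filter (fun p => p.2 == w)).map (·.1) := by
  unfold dvIndex
  have h : (PySem.List.enumerate fw 0).foldl
      (fun d p => d.modify p.2 [] (fun l => l ++ [p.1])) PySem.Dict.empty
      = ((PySem.List.enumerate fw 0).map (fun p => (p.2, p.1))).foldl
        (fun d p => d.modify p.1 [] (fun l => l ++ [p.2])) PySem.Dict.empty := by
    rw [List.foldl_map]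
  rw [h, PySem.Dict.getD_foldl_modify_append]
  simp [List.filter_map, Function.comp_def, List.map_map]

lemma mem_dvIndex (fw : List String) (j : Int) (w : String) :
    j ∈ (dvIndex fw).getD w [] ↔ ∃ (k : Nat) (_ : k < fw.length), fw[k] = w ∧ j = (k : Int) := by
  rw [dvIndex_getD]
  simp only [List.mem_map, List.mem_filter, PySem.List.mem_enumerate_iff]
  constructor
  · rintro ⟨p, ⟨⟨k, hk, rfl⟩, hw⟩, rfl⟩
    exact ⟨k, hk, by simpa using hw, by simp⟩
  · rintro ⟨k, hk, hw, rfl⟩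
    exact ⟨((k : Int), fw[k]), ⟨⟨k, hk, by simp⟩, by simpa using hw⟩, rfl⟩

-- membership in the hit set accumulated by the update loop
lemma mem_dvHit (index : PySem.Dict String (List Int)) (l : List String) (h0 : PySem.Set Int) (j : Int) :
    j ∈ l.foldl (fun h word => PySem.Set.update h (index.getD word [])) h0 ↔
      j ∈ h0 ∨ ∃ w ∈ l, j ∈ index.getD w [] := by
  induction l generalizing h0 with
  | nil => simp
  | cons x xs ih =>
    simp only [List.foldl_cons, ih, PySem.Set.mem_update, List.mem_cons]
    constructor
    · rintro (((h | h) | ⟨w, hw, hj⟩))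
      · exact Or.inl h
      · exact Or.inr ⟨x, Or.inl rfl, h⟩
      · exact Or.inr ⟨w, Or.inr hw, hj⟩
    · rintro (h | ⟨w, (rfl | hw), hj⟩)
      · exact Or.inl (Or.inl h)
      · exact Or.inl (Or.inr hj)
      · exact Or.inr ⟨w, hw, hj⟩

-- B's per-sample vector is exactly A's per-sample indicator list
lemma dvVectorize_eq (fw : List String) (sample : List String) :
    dvVectorize (dvIndex fw) (PySem.List.len fw) sample
      = fw.map (fun word => if PySem.Set.contains (PySem.Set.ofList sample) word then (1 : Int) else 0) := by
  unfold dvVectorize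
  have hlen : PySem.List.len fw = (fw.length : Int) := by simp [PySem.List.len]
  rw [hlen, PySem.List.pyRange_one]
  have hn : ((fw.length : Int) - 0).toNat = fw.length := by omega
  rw [hn]
  apply List.ext_getElem
  · simp
  · intro i h1 h2
    simp only [List.getElem_map, List.getElem_range]
    have hi : i < fw.length := by simpa using h2
    have key : ((i : Int) ∈ List.foldl (fun h word => PySem.Set.update h ((dvIndex fw).getD word []))
        ([] : PySem.Set Int) (PySem.Set.ofList sample)) ↔ fw[i] ∈ sample := by
      rw [mem_dvHit]
      simp only [PySem.Set.mem_ofList, List.not_mem_nil, false_or]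
      constructor
      · rintro ⟨w, hw, hj⟩
        rw [mem_dvIndex] at hj
        obtain ⟨k, hk, hfw, hjk⟩ := hj
        have : k = i := by omega
        subst this
        rwa [hfw]
      · intro h
        refine ⟨fw[i], h, ?_⟩
        rw [mem_dvIndex]
        exact ⟨i, hi, rfl, rfl⟩
    simp [key]

-- A's inner loop is a map
lemma dvInner_eq (fw : List String) (s : PySem.Set String) :
    fw.foldl (fun sl word => if PySem.Set.contains s word then sl ++ [(1 : Int)] else sl ++ [(0 : Int)]) []
      = fw.map (fun word => if PySem.Set.contains s word then (1 : Int) else 0) := by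
  have h : (fun (sl : List Int) (word : String) =>
      if PySem.Set.contains s word then sl ++ [(1 : Int)] else sl ++ [(0 : Int)])
      = fun sl word => sl ++ [if PySem.Set.contains s word then (1 : Int) else 0] := by
    funext sl word; split <;> rfl
  rw [h, PySem.List.foldl_append_singleton_eq_map]
  simp

-- ===== VERDICT (by name: the statement is the Claim_ definition above) =====
theorem data_vector_spec : Claim_equal_data_vector := by
  intro fw tr te _
  unfold Spec_data_vector data_vector data_vector_alt
  have houter : ∀ (xs : List (List String)),
      xs.foldl (fun acc sample =>
        let sample_set : PySem.Set String := PySem.Set.ofList sample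
        acc ++ [fw.foldl (fun sl word =>
          if PySem.Set.contains sample_set word then sl ++ [(1 : Int)] else sl ++ [(0 : Int)]) []]) []
      = xs.map (dvVectorize (dvIndex fw) (PySem.List.len fw)) := by
    intro xs
    rw [PySem.List.foldl_append_singleton_eq_map]
    simp only [List.nil_append]
    apply List.map_congr_left
    intro sample _
    rw [dvInner_eq, dvVectorize_eq]
  simp only []
  rw [houter tr, houter te]
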